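-- pv_equiv track=rewrite | github.com/AaronRobson/sequences | itertoolsrecipes.py | rolling_collection
-- ===== SOURCE A (Python) =====
-- from itertools import islice, chain, count
--
-- def rolling_collection(items, sample_size, pad=0, pad_value=None):
--     if sample_size < 1:
--         raise ValueError('Sample Size must be at least 1.')
--
--     if pad < 0:
--         raise ValueError('Padding should be at least 0.')
--
--     padding_items = (pad_value,) * pad
--     items = chain(padding_items, items, padding_items)
--
--     items = tuple(items)
--
--     for i in range(len(items)-sample_size+1):
--         yield items[i:i+sample_size]
-- ===== SOURCE B (Python) =====
-- from itertools import islice, chain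
-- from collections import deque
--
--
-- def rolling_collection(items, sample_size, pad=0, pad_value=None):
--     if sample_size < 1:
--         raise ValueError('Sample Size must be at least 1.')
--
--     if pad < 0:
--         raise ValueError('Padding should be at least 0.')
--
--     padding_items = (pad_value,) * pad
--     it = chain(padding_items, items, padding_items)
--
--     window = deque(islice(it, sample_size), maxlen=sample_size)
--     if len(window) < sample_size:
--         return
--     yield tuple(window)
--     for item in it:
--         window.append(item)
--         yield tuple(window)
-- ===== Notes on version B (the rewrite author's own statement) =====
-- stated objective: alternative
-- what changed: B streams a deque-maintained sliding window (prime from islice, then append-and-yield) over the chained iterator instead of materializing the whole padded sequence into a tuple and slicing it by index for each i.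
import Mathlib
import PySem

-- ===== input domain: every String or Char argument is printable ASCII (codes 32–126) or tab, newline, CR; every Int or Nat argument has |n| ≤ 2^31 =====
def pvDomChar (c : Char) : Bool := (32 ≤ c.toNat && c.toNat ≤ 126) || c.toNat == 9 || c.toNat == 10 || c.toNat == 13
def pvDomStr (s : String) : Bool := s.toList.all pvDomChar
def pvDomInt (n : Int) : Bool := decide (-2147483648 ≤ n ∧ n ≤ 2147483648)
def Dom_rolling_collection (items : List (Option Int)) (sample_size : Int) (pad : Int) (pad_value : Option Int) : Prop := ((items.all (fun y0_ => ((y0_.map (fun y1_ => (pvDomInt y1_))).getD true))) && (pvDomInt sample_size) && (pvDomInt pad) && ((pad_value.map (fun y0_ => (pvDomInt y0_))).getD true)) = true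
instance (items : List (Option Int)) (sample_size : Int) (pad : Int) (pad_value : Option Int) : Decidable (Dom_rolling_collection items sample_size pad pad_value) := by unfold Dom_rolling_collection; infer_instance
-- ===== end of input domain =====

-- B replaces A's materialize-then-slice-by-index with a streaming sliding window (prime k items,
-- then evict-left/append-right per item); alternative structure, same asymptotic cost.
-- Both programs raise ValueError when sample_size < 1 or pad < 0; Pre_ excludes exactly those.

-- ===== PORT A =====
def rolling_collection (items : List (Option Int)) (sample_size : Int) (pad : Int) (pad_value : Option Int) : List (List (Option Int)) :=
  if sample_size < 1 then []       -- raise ValueError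
  else if pad < 0 then []          -- raise ValueError
  else
    let padding_items := List.replicate pad.toNat pad_value
    let its := padding_items ++ items ++ padding_items
    (PySem.List.pyRange 0 ((its.length : Int) - sample_size + 1) 1).map
      (fun i => PySem.List.slice its (some i) (some (i + sample_size)))

-- ===== PORT B =====
-- the for-loop of B: window holds the last sample_size items; append evicts the leftmost
def rcGo (window : List (Option Int)) : List (Option Int) → List (List (Option Int))
  | [] => []
  | x :: xs =>
    let w := window.tail ++ [x]
    w :: rcGo w xs

def rolling_collection_alt (items : List (Option Int)) (sample_size : Int) (pad : Int) (pad_value : Option Int) : List (List (Option Int)) :=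
  if sample_size < 1 then []       -- raise ValueError
  else if pad < 0 then []          -- raise ValueError
  else
    let padding_items := List.replicate pad.toNat pad_value
    let its := padding_items ++ items ++ padding_items
    let k := sample_size.toNat
    let window := its.take k       -- deque(islice(it, sample_size))
    if window.length < k then []
    else window :: rcGo window (its.drop k)

-- ===== PRECONDITION & SPEC =====
-- exactly the inputs on which A returns normally: A raises ValueError iff sample_size < 1 or pad < 0
def Pre_rolling_collection (items : List (Option Int)) (sample_size : Int) (pad : Int) (pad_value : Option Int) : Prop :=
  1 ≤ sample_size ∧ 0 ≤ pad
instance (items : List (Option Int)) (sample_size : Int) (pad : Int) (pad_value : Option Int) : Decidable (Pre_rolling_collection items sample_size pad pad_value) := by unfold Pre_rolling_collection; infer_instance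

def pvWitness_rolling_collection : List (Option Int) × Int × Int × Option Int := ([some 1, none, some (-2)], 2, 1, some 7)

def Spec_rolling_collection (items : List (Option Int)) (sample_size : Int) (pad : Int) (pad_value : Option Int) (out : List (List (Option Int))) : Prop := out = rolling_collection_alt items sample_size pad pad_value
instance (items : List (Option Int)) (sample_size : Int) (pad : Int) (pad_value : Option Int) (out : List (List (Option Int))) : Decidable (Spec_rolling_collection items sample_size pad pad_value out) := by unfold Spec_rolling_collection; infer_instance

-- ===== CLAIM (what is proved, stated in full; the proofs are below) =====
def Claim_equal_rolling_collection : Prop := ∀ (items : List (Option Int)) (sample_size : Int) (pad : Int) (pad_value : Option Int), Dom_rolling_collection items sample_size pad pad_value → Pre_rolling_collection items sample_size pad pad_value → Spec_rolling_collection items sample_size pad pad_value (rolling_collection items sample_size pad pad_value)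

-- ===== LEMMAS AND PROOFS =====

-- B's loop yields, for each consumed item, the k-window ending at it
theorem rcGo_eq (k : ℕ) (hk : 1 ≤ k) :
    ∀ (rest w : List (Option Int)), w.length = k →
      rcGo w rest = (List.range rest.length).map (fun j => ((w ++ rest).drop (j+1)).take k) := by
  intro rest
  induction rest with
  | nil => intro w hw; simp [rcGo]
  | cons x xs ih =>
    intro w hw
    have hwne : w ≠ [] := by intro h; subst h; simp at hw; omega
    have hlen : (w.tail ++ [x]).length = k := by
      simp [List.length_tail, hw]; omega
    have hdrop1 : (w ++ x :: xs).drop 1 = (w.tail ++ [x]) ++ xs := by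
      cases w with
      | nil => exact absurd rfl hwne
      | cons a as => simp
    simp only [rcGo, List.length_cons, List.range_succ_eq_map, List.map_cons, List.map_map]
    refine List.cons_eq_cons.mpr ⟨?_, ?_⟩
    · -- head window
      have : ((w ++ x :: xs).drop 1).take k = ((w.tail ++ [x]) ++ xs).take k := by rw [hdrop1]
      rw [this, List.take_append_of_le_length (by omega), List.take_of_length_le (by omega)]
    · rw [ih (w.tail ++ [x]) hlen]
      apply List.map_congr_left
      intro j hj
      simp only [Function.comp]
      have : (w ++ x :: xs).drop (j + 1 + 1) = ((w.tail ++ [x]) ++ xs).drop (j + 1) := by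
        rw [← hdrop1, List.drop_drop]
        congr 1
        omega
      rw [this]

-- the slice-by-index formulation equals the streamed windows, over any padded list
theorem windows_eq (p : List (Option Int)) (k : ℕ) (hk : 1 ≤ k) :
    (PySem.List.pyRange 0 ((p.length : Int) - k + 1) 1).map
        (fun i => PySem.List.slice p (some i) (some (i + (k : Int)))) =
      if (p.take k).length < k then []
      else p.take k :: rcGo (p.take k) (p.drop k) := by
  rw [PySem.List.pyRange_one]
  simp only [zero_add, List.map_map]
  have hslice : ∀ j : ℕ, PySem.List.slice p (some (j : Int)) (some ((j : Int) + (k : Int))) = (p.drop j).take k :=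
    fun j => PySem.List.slice_natCast_add p j k
  by_cases hlt : p.length < k
  · have h0 : (((p.length : Int) - k + 1) - 0).toNat = 0 := by omega
    rw [h0]
    have hc : (p.take k).length < k := by simp; omega
    simp only [List.range_zero, List.map_nil]
    rw [if_pos hc]
  · push Not at hlt
    have h0 : (((p.length : Int) - k + 1) - 0).toNat = (p.length - k) + 1 := by omega
    have hwl : (p.take k).length = k := by simp; omega
    rw [h0]
    simp only [hwl, lt_irrefl, if_false]
    rw [List.range_succ_eq_map, List.map_cons, List.map_map]
    refine List.cons_eq_cons.mpr ⟨?_, ?_⟩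
    · simp only [Function.comp, Nat.cast_zero, zero_add] at *
      simpa using hslice 0
    · rw [rcGo_eq k hk (p.drop k) (p.take k) hwl]
      simp only [List.take_append_drop, List.length_drop, List.map_map]
      apply List.map_congr_left
      intro j hj
      simpa using hslice (j + 1)

-- ===== VERDICT (by name: the statement is the Claim_ definition above) =====
theorem rolling_collection_spec : Claim_equal_rolling_collection := by
  intro items sample_size pad pad_value _ hpre
  obtain ⟨hss, hpad⟩ := hpre
  unfold Spec_rolling_collection rolling_collection rolling_collection_alt
  have h1 : ¬ sample_size < 1 := by omega
  have h2 : ¬ pad < 0 := by omega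
  simp only [h1, h2, if_false]
  have hk : 1 ≤ sample_size.toNat := by omega
  have hcast : sample_size = (sample_size.toNat : Int) := by omega
  rw [hcast]
  exact windows_eq _ sample_size.toNat hk
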